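-- pv_equiv track=rewrite | github.com/QDebulois/Redim | Redim/convertisseur.py | rennomage
-- ===== SOURCE A (Python) =====
-- def rennomage(origine_nom, larg, format_final):
--     charcters_indesirable = ("(", ")", "[", "]", "{", "}","'", "#",
--             "&","$","£", "¤", "€", "`", "^", "°", "¨",
--             "@", "!", ",", "~", "%", ";", "µ", "§")
--     charcters_underscore = (" ", "-")
--     nouveau_nom = origine_nom
--     for i in charcters_indesirable:
--         nouveau_nom = nouveau_nom.replace(i, "")
--     for i in charcters_underscore:
--         nouveau_nom = nouveau_nom.replace(i, "_")
--     return nouveau_nom.lower() + "_modif_" + str(larg) + format_final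
-- ===== SOURCE B (Python) =====
-- def rennomage(origine_nom, larg, format_final):
--     indesirable = set("()[]{}'#&$\u00a3\u00a4\u20ac`^\u00b0\u00a8@!,~%;\u00b5\u00a7")
--     out = []
--     for c in origine_nom:
--         if c in indesirable:
--             continue
--         if c == " " or c == "-":
--             out.append("_")
--         else:
--             out.append(c)
--     return "".join(out).lower() + "_modif_" + str(larg) + format_final
-- ===== Notes on version B (the rewrite author's own statement) =====
-- stated objective: alternative
-- what changed: Replaces A's 27 sequential full-string str.replace scans with a single pass over the input that classifies every character once (drop / underscore / keep) and joins the result; same asymptotic cost, fewer traversals, but no measured speedup in CPython.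
import Mathlib
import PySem

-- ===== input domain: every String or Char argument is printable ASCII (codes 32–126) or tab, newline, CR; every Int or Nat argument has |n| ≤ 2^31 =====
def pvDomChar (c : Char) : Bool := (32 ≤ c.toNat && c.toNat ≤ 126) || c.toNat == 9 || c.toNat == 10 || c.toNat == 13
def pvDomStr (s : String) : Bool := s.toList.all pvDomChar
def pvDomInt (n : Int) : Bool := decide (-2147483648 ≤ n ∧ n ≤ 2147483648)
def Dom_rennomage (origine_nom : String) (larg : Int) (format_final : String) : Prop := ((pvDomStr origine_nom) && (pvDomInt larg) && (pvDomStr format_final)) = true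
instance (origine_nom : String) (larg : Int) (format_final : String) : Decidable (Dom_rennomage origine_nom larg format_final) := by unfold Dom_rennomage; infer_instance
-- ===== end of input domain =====

-- B replaces A's 27 sequential full-string replace scans by one single pass that
-- classifies each character (drop / underscore / keep); objective: alternative (one traversal instead of 27).


-- ===== PORT A =====
-- the tuple `charcters_indesirable` (each element is a one-character string)
def pvBadChars : List Char :=
  ['(', ')', '[', ']', '{', '}', '\'', '#', '&', '$', '£', '¤', '€', '`', '^', '°', '¨',
   '@', '!', ',', '~', '%', ';', 'µ', '§']

def rennomage (origine_nom : String) (larg : Int) (format_final : String) : String :=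
  -- for i in charcters_indesirable: nouveau_nom = nouveau_nom.replace(i, "")
  let nouveau1 := pvBadChars.foldl (fun s c => PySem.Str.replace s (String.ofList [c]) "") origine_nom
  -- for i in charcters_underscore: nouveau_nom = nouveau_nom.replace(i, "_")
  let nouveau2 := [' ', '-'].foldl (fun s c => PySem.Str.replace s (String.ofList [c]) "_") nouveau1
  PySem.Str.lower nouveau2 ++ "_modif_" ++ PySem.Int.toStr larg ++ format_final

-- ===== PORT B =====
-- indesirable = set("()[]{}'#&$£¤€`^°¨@!,~%;µ§")
def pvIndesirable : PySem.Set Char := PySem.Set.ofList "()[]{}'#&$£¤€`^°¨@!,~%;µ§".toList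

def rennomage_alt (origine_nom : String) (larg : Int) (format_final : String) : String :=
  -- one pass: drop undesirable chars, turn ' '/'-' into '_', keep the rest
  let out := origine_nom.toList.foldl
    (fun acc c =>
      if pvIndesirable.contains c then acc
      else if c = ' ' ∨ c = '-' then acc ++ ['_']
      else acc ++ [c]) []
  PySem.Str.lower (String.ofList out) ++ "_modif_" ++ PySem.Int.toStr larg ++ format_final

-- ===== PRECONDITION & SPEC =====
def Spec_rennomage (origine_nom : String) (larg : Int) (format_final : String) (out : String) : Prop := out = rennomage_alt origine_nom larg format_final
instance (origine_nom : String) (larg : Int) (format_final : String) (out : String) : Decidable (Spec_rennomage origine_nom larg format_final out) := by unfold Spec_rennomage; infer_instance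

-- ===== CLAIM (what is proved, stated in full; the proofs are below) =====
def Claim_equal_rennomage : Prop := ∀ (origine_nom : String) (larg : Int) (format_final : String), Dom_rennomage origine_nom larg format_final → Spec_rennomage origine_nom larg format_final (rennomage origine_nom larg format_final)

-- ===== LEMMAS AND PROOFS =====

-- the one-pass classification map used by B ('_' for space/hyphen, identity otherwise)
def pvG (c : Char) : Char := if c = ' ' ∨ c = '-' then '_' else c

-- replace(s, c, "") for a single character c is a filter
lemma go_del (c : Char) : ∀ (l acc : List Char) (fuel : Nat), l.length ≤ fuel →
    PySem.Chars.replace.go [c] [] fuel l acc = acc.reverse ++ l.filter (fun x => !(x == c)) := by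
  intro l
  induction l with
  | nil => intro acc fuel _; cases fuel <;> simp [PySem.Chars.replace.go]
  | cons hd tl ih =>
    intro acc fuel h
    cases fuel with
    | zero => simp at h
    | succ n =>
      by_cases hc : c = hd
      · subst hc
        simp [PySem.Chars.replace.go, List.isPrefixOf, ih acc n (by simp only [List.length_cons] at h; omega)]
      · have hne : (c == hd) = false := by simpa using hc
        simp [PySem.Chars.replace.go, List.isPrefixOf, hne,
              ih (hd :: acc) n (by simp only [List.length_cons] at h; omega), Ne.symm hc]

lemma replace_del (c : Char) (l : List Char) :
    PySem.Chars.replace l [c] [] = l.filter (fun x => !(x == c)) := by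
  simpa [PySem.Chars.replace] using go_del c l [] l.length le_rfl

-- replace(s, c, "_") for a single character c is a map
lemma go_sub (c d : Char) : ∀ (l acc : List Char) (fuel : Nat), l.length ≤ fuel →
    PySem.Chars.replace.go [c] [d] fuel l acc = acc.reverse ++ l.map (fun x => if x = c then d else x) := by
  intro l
  induction l with
  | nil => intro acc fuel _; cases fuel <;> simp [PySem.Chars.replace.go]
  | cons hd tl ih =>
    intro acc fuel h
    cases fuel with
    | zero => simp at h
    | succ n =>
      by_cases hc : c = hd
      · subst hc
        simp [PySem.Chars.replace.go, List.isPrefixOf, ih (d :: acc) n (by simp only [List.length_cons] at h; omega)]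
      · have hne : (c == hd) = false := by simpa using hc
        simp [PySem.Chars.replace.go, List.isPrefixOf, hne,
              ih (hd :: acc) n (by simp only [List.length_cons] at h; omega), Ne.symm hc]

lemma replace_sub (c d : Char) (l : List Char) :
    PySem.Chars.replace l [c] [d] = l.map (fun x => if x = c then d else x) := by
  simpa [PySem.Chars.replace] using go_sub c d l [] l.length le_rfl

-- A's first loop: folding single-character deletions is one filter
lemma foldl_del (cs : List Char) : ∀ (o : String),
    (cs.foldl (fun s c => PySem.Str.replace s (String.ofList [c]) "") o).toList
      = o.toList.filter (fun x => !cs.contains x) := by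
  induction cs with
  | nil => intro o; simp
  | cons c cs ih =>
    intro o
    have h1 : (PySem.Str.replace o (String.ofList [c]) "").toList
        = o.toList.filter (fun x => !(x == c)) := by
      simp [PySem.Str.toList_replace, replace_del]
    rw [List.foldl_cons, ih, h1, List.filter_filter]
    apply List.filter_congr
    intro x _
    by_cases hx : x = c
    · simp [hx]
    · simp [List.contains_cons, hx, Ne.symm hx]

-- B's loop: the one-pass fold is filter-then-map
lemma foldl_classify : ∀ (s acc : List Char),
    s.foldl
      (fun acc c =>
        if pvIndesirable.contains c then acc
        else if c = ' ' ∨ c = '-' then acc ++ ['_']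
        else acc ++ [c]) acc
      = acc ++ (s.filter (fun c => !pvIndesirable.contains c)).map pvG := by
  intro s
  induction s with
  | nil => intro acc; simp
  | cons c t ih =>
    intro acc
    simp only [List.foldl_cons]
    by_cases h : c ∈ pvIndesirable
    · rw [if_pos (by simp [PySem.Set.contains, h]), ih]
      simp [List.filter_cons, PySem.Set.contains, h]
    · rw [if_neg (by simp [PySem.Set.contains, h])]
      by_cases hu : c = ' ' ∨ c = '-'
      · rw [if_pos hu, ih]
        simp [List.filter_cons, PySem.Set.contains, h, hu, pvG]
      · rw [if_neg hu, ih]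
        simp [List.filter_cons, PySem.Set.contains, h, hu, pvG]

-- the two character lists agree (the set keeps first occurrences in order)
lemma sets_eq : pvIndesirable = pvBadChars := by decide

theorem pv_main (origine_nom : String) (larg : Int) (format_final : String) :
    rennomage origine_nom larg format_final = rennomage_alt origine_nom larg format_final := by
  unfold rennomage rennomage_alt
  have hmid :
      ([' ', '-'].foldl (fun s c => PySem.Str.replace s (String.ofList [c]) "_")
        (pvBadChars.foldl (fun s c => PySem.Str.replace s (String.ofList [c]) "") origine_nom))
      = String.ofList (origine_nom.toList.foldl
          (fun acc c =>
            if pvIndesirable.contains c then acc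
            else if c = ' ' ∨ c = '-' then acc ++ ['_']
            else acc ++ [c]) []) := by
    apply String.toList_inj.mp
    rw [foldl_classify]
    have hus : "_".toList = ['_'] := by decide
    simp only [List.foldl_cons, List.foldl_nil, PySem.Str.toList_replace, hus, replace_sub,
      String.toList_ofList, foldl_del, List.map_map, sets_eq, PySem.Set.contains,
      List.nil_append]
    apply List.map_congr_left
    intro x _
    by_cases h1 : x = ' ' <;> by_cases h2 : x = '-' <;>
      simp [pvG, Function.comp, h1, h2]
  show PySem.Str.lower (([' ', '-'].foldl (fun s c => PySem.Str.replace s (String.ofList [c]) "_")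
        (pvBadChars.foldl (fun s c => PySem.Str.replace s (String.ofList [c]) "") origine_nom)))
        ++ "_modif_" ++ PySem.Int.toStr larg ++ format_final
      = PySem.Str.lower (String.ofList (origine_nom.toList.foldl
          (fun acc c =>
            if pvIndesirable.contains c then acc
            else if c = ' ' ∨ c = '-' then acc ++ ['_']
            else acc ++ [c]) []))
        ++ "_modif_" ++ PySem.Int.toStr larg ++ format_final
  rw [hmid]

-- ===== VERDICT (by name: the statement is the Claim_ definition above) =====
theorem rennomage_spec : Claim_equal_rennomage := by
  intro o l f _
  unfold Spec_rennomage
  exact pv_main o l f
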